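-- pv_equiv track=rewrite | github.com/uw-comphys/openccm | openccm/mesh/convert_openfoam.py | _create_facet_connectivity
-- ===== SOURCE A (Python) =====
-- from collections import defaultdict
-- from typing import Tuple, Dict, List, Set
-- from itertools import combinations
--
-- def _create_facet_connectivity(facet_vertices_all: Tuple[Tuple[int, ...], ...]) -> Tuple[Tuple[int, ...], ...]:
--     """
--     Create facet connectivity based on the shared vertices between facets.
--
--     Args:
--         facet_vertices_all: A tuple of tuples representing the vertices of each facet.
--
--     Returns:
--         facet_connectivity: A tuple of tuples representing the connected facets for each facet.
--     """
--     vertex_facets = defaultdict(set)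
--     for facet_id, vertices in enumerate(facet_vertices_all):
--         for vertex in vertices:
--             vertex_facets[vertex].add(facet_id)
--
--     facet_connectivity = []
--     for facet_id, vertices in enumerate(facet_vertices_all):
--         # Get the facet IDs associated with the current vertex and remove the current facet ID from the set
--         possible_connection = [vertex_facets[vertex_id] - {facet_id} for vertex_id in vertices]
--
--         # Perform the intersection of facet ID sets for all combinations of possible connections
--         intersected_elements = set()
--         for combination in combinations(possible_connection, 2):
--             intersected_elements.update(set.intersection(*combination))
--
--         facet_connectivity.append(tuple(sorted(intersected_elements)))
--
--     return tuple(facet_connectivity)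
-- ===== SOURCE B (Python) =====
-- def _create_facet_connectivity(facet_vertices_all):
--     # Index: vertex -> list of facet ids containing it (distinct, increasing).
--     vertex_facets = {}
--     for facet_id, vertices in enumerate(facet_vertices_all):
--         for vertex in set(vertices):
--             vertex_facets.setdefault(vertex, []).append(facet_id)
--
--     facet_connectivity = []
--     for facet_id, vertices in enumerate(facet_vertices_all):
--         # Count, per neighbouring facet, how many of this facet's vertex slots it shares.
--         counts = {}
--         for vertex in vertices:
--             for other in vertex_facets.get(vertex, []):
--                 if other != facet_id:
--                     counts[other] = counts.get(other, 0) + 1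
--         facet_connectivity.append(tuple(sorted(g for g, c in counts.items() if c >= 2)))
--     return tuple(facet_connectivity)
-- ===== Notes on version B (the rewrite author's own statement) =====
-- stated objective: faster
-- what changed: Replaces the per-facet pairwise set intersections over all vertex combinations (quadratic in facet degree) by a single counting pass: count shared vertex slots per neighbouring facet and keep neighbours with count >= 2.
import Mathlib
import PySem

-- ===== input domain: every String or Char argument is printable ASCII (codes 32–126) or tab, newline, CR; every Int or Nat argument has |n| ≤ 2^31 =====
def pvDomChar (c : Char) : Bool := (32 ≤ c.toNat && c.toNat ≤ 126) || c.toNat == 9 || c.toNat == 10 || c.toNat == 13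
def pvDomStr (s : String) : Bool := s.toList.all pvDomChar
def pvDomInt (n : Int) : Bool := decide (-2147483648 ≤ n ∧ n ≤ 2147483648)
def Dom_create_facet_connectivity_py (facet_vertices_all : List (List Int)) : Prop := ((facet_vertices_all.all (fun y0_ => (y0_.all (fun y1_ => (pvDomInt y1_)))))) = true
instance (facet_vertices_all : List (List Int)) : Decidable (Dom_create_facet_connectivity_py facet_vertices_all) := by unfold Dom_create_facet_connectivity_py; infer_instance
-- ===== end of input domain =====

-- B replaces A's per-facet pairwise set intersections over all vertex combinations by one
-- counting pass per facet (neighbours sharing ≥ 2 vertex slots), measured faster on large inputs.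

-- ===== PORT A =====
-- itertools.combinations(l, 2), ported by hand (exact: all pairs (l[i], l[j]) with i < j, in Python's order)
def pvCombo2 {α : Type} : List α → List (α × α)
  | [] => []
  | x :: xs => xs.map (fun y => (x, y)) ++ pvCombo2 xs

def create_facet_connectivity_py (facet_vertices_all : List (List Int)) : List (List Int) :=
  let vertex_facets : PySem.Dict Int (PySem.Set Int) :=
    (PySem.List.enumerate facet_vertices_all).foldl (fun d p =>
      p.2.foldl (fun d v => d.modify v [] (fun s => PySem.Set.add s p.1)) d) PySem.Dict.empty
  (PySem.List.enumerate facet_vertices_all).foldl (fun acc p =>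
    let possible : List (PySem.Set Int) :=
      p.2.map (fun v => PySem.Set.diff (vertex_facets.getD v []) [p.1])
    let intersected : PySem.Set Int :=
      (pvCombo2 possible).foldl (fun s q => PySem.Set.update s (PySem.Set.inter q.1 q.2)) []
    acc ++ [PySem.List.sorted intersected (fun x => x) false]) []

-- ===== PORT B =====
-- vertex_facets.setdefault(vertex, []).append(facet_id)  ==  modify vertex [] (· ++ [facet_id])
def create_facet_connectivity_py_alt (facet_vertices_all : List (List Int)) : List (List Int) :=
  let vertex_facets : PySem.Dict Int (List Int) :=
    (PySem.List.enumerate facet_vertices_all).foldl (fun d p =>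
      (PySem.Set.ofList p.2).foldl (fun d v => d.modify v [] (fun l => l ++ [p.1])) d) PySem.Dict.empty
  (PySem.List.enumerate facet_vertices_all).foldl (fun acc p =>
    let counts : PySem.Dict Int Int :=
      p.2.foldl (fun c v =>
        (vertex_facets.getD v []).foldl (fun c other =>
          if other = p.1 then c else c.insert other (c.getD other 0 + 1)) c) PySem.Dict.empty
    acc ++ [PySem.List.sorted ((counts.items.filter (fun q => 2 ≤ q.2)).map (·.1)) (fun x => x) false]) []

-- ===== PRECONDITION & SPEC =====
def Spec_create_facet_connectivity_py (facet_vertices_all : List (List Int)) (out : List (List Int)) : Prop := out = create_facet_connectivity_py_alt facet_vertices_all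
instance (facet_vertices_all : List (List Int)) (out : List (List Int)) : Decidable (Spec_create_facet_connectivity_py facet_vertices_all out) := by unfold Spec_create_facet_connectivity_py; infer_instance

-- ===== CLAIM (what is proved, stated in full; the proofs are below) =====
def Claim_equal_create_facet_connectivity_py : Prop := ∀ (facet_vertices_all : List (List Int)), Dom_create_facet_connectivity_py facet_vertices_all → Spec_create_facet_connectivity_py facet_vertices_all (create_facet_connectivity_py facet_vertices_all)

-- ===== LEMMAS AND PROOFS =====

-- the semantic vertex→facets index: ids (in increasing order) of the facets containing v
def pvFB (facet_vertices_all : List (List Int)) (v : Int) : List Int :=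
  ((PySem.List.enumerate facet_vertices_all).filter (fun p => decide (v ∈ p.2))).map (·.1)

theorem pvFB_nodup (fva : List (List Int)) (v : Int) : (pvFB fva v).Nodup := by
  have h := (PySem.List.pairwise_lt_enumerate fva 0).filter (fun p => decide (v ∈ p.2))
  have h2 : (pvFB fva v).Pairwise (· < ·) := by
    unfold pvFB
    exact List.pairwise_map.mpr h
  exact h2.imp ne_of_lt

-- A's dict build, inner loop over one facet's vertex tuple
theorem pvInnerA (vs : List Int) (d : PySem.Dict Int (PySem.Set Int)) (i w : Int) :
    (vs.foldl (fun d v => d.modify v [] (fun s => PySem.Set.add s i)) d).getD w [] =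
    if w ∈ vs then PySem.Set.add (d.getD w []) i else d.getD w [] := by
  induction vs generalizing d with
  | nil => simp
  | cons v rest ih =>
    simp only [List.foldl_cons, ih, PySem.Dict.getD_modify, List.mem_cons]
    by_cases hw : w = v
    · subst hw
      by_cases hr : w ∈ rest
      · rw [if_pos rfl, if_pos (Or.inl rfl),
          PySem.Set.add_of_mem ((PySem.Set.mem_add _ i i).mpr (Or.inr rfl)), if_pos hr]
      · simp [hr]
    · simp [hw]

-- A's dict build, outer loop
theorem pvOuterA (l : List (Int × List Int)) (d : PySem.Dict Int (PySem.Set Int)) (w : Int) :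
    (l.foldl (fun d p => p.2.foldl (fun d v => d.modify v [] (fun s => PySem.Set.add s p.1)) d) d).getD w [] =
    PySem.Set.update (d.getD w []) ((l.filter (fun p => decide (w ∈ p.2))).map (·.1)) := by
  induction l generalizing d with
  | nil => simp [PySem.Set.update_nil]
  | cons p rest ih =>
    simp only [List.foldl_cons, ih, pvInnerA, List.filter_cons]
    by_cases hp : w ∈ p.2
    · simp [hp, PySem.Set.update_cons]
    · simp [hp]

theorem pvDictA (fva : List (List Int)) (w : Int) :
    (((PySem.List.enumerate fva).foldl (fun d p =>
        p.2.foldl (fun d v => d.modify v [] (fun s => PySem.Set.add s p.1)) d)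
        PySem.Dict.empty : PySem.Dict Int (PySem.Set Int)).getD w []) = pvFB fva w := by
  rw [pvOuterA]
  simp only [PySem.Dict.getD_empty]
  rw [PySem.Set.update_nil_left]
  exact PySem.Set.ofList_eq_self_of_nodup _ (pvFB_nodup fva w)

-- B's dict build, inner loop over the deduplicated vertex set of one facet
theorem pvInnerB (ws : List Int) (hnd : ws.Nodup) (d : PySem.Dict Int (List Int)) (i w : Int) :
    (ws.foldl (fun d v => d.modify v [] (fun l => l ++ [i])) d).getD w [] =
    if w ∈ ws then d.getD w [] ++ [i] else d.getD w [] := by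
  induction ws generalizing d with
  | nil => simp
  | cons v rest ih =>
    simp only [List.foldl_cons, ih hnd.of_cons, PySem.Dict.getD_modify, List.mem_cons]
    by_cases hw : w = v
    · subst hw
      have hr : w ∉ rest := (List.nodup_cons.mp hnd).1
      simp [hr]
    · simp [hw]

-- B's dict build, outer loop
theorem pvOuterB (l : List (Int × List Int)) (d : PySem.Dict Int (List Int)) (w : Int) :
    (l.foldl (fun d p => (PySem.Set.ofList p.2).foldl (fun d v => d.modify v [] (fun l => l ++ [p.1])) d) d).getD w [] =
    d.getD w [] ++ (l.filter (fun p => decide (w ∈ p.2))).map (·.1) := by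
  induction l generalizing d with
  | nil => simp
  | cons p rest ih =>
    simp only [List.foldl_cons, ih, pvInnerB _ (PySem.Set.nodup_ofList p.2), List.filter_cons,
      PySem.Set.mem_ofList]
    by_cases hp : w ∈ p.2
    · simp [hp]
    · simp [hp]

theorem pvDictB (fva : List (List Int)) (w : Int) :
    (((PySem.List.enumerate fva).foldl (fun d p =>
        (PySem.Set.ofList p.2).foldl (fun d v => d.modify v [] (fun l => l ++ [p.1])) d)
        PySem.Dict.empty : PySem.Dict Int (List Int)).getD w []) = pvFB fva w := by
  rw [pvOuterB]
  simp [pvFB]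

-- pairs-with-both-sides-true  ↔  at least two positions satisfy the predicate
theorem pvCombo2_iff {α : Type} (l : List α) (p : α → Bool) :
    (∃ q ∈ pvCombo2 l, p q.1 = true ∧ p q.2 = true) ↔ 2 ≤ l.countP p := by
  induction l with
  | nil => simp [pvCombo2]
  | cons x xs ih =>
    rw [List.countP_cons]
    simp only [pvCombo2, List.mem_append, List.mem_map]
    by_cases hx : p x = true
    · constructor
      · rintro ⟨q, hq, h1, h2⟩
        rcases hq with ⟨y, hy, rfl⟩ | hq
        · have : 0 < xs.countP p := List.countP_pos_iff.mpr ⟨y, hy, h2⟩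
          rw [if_pos hx]; omega
        · have := ih.mp ⟨q, hq, h1, h2⟩; rw [if_pos hx]; omega
      · intro h
        rw [if_pos hx] at h
        rcases Nat.lt_or_ge (xs.countP p) 2 with h2 | h2
        · have h1 : 0 < xs.countP p := by omega
          obtain ⟨y, hy, hpy⟩ := List.countP_pos_iff.mp h1
          exact ⟨(x, y), Or.inl ⟨y, hy, rfl⟩, hx, hpy⟩
        · obtain ⟨q, hq, hq1, hq2⟩ := ih.mpr h2
          exact ⟨q, Or.inr hq, hq1, hq2⟩
    · constructor
      · rintro ⟨q, hq, h1, h2⟩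
        rcases hq with ⟨y, hy, rfl⟩ | hq
        · exact absurd h1 hx
        · have := ih.mp ⟨q, hq, h1, h2⟩
          rw [if_neg hx]; omega
      · intro h
        rw [if_neg hx] at h
        obtain ⟨q, hq, h1, h2⟩ := ih.mpr (by omega)
        exact ⟨q, Or.inr hq, h1, h2⟩

theorem pvMemFoldlUpdate {α β : Type} [BEq α] [LawfulBEq α] (l : List β) (f : β → List α)
    (s0 : PySem.Set α) (x : α) :
    (x ∈ l.foldl (fun s q => PySem.Set.update s (f q)) s0) ↔ x ∈ s0 ∨ ∃ q ∈ l, x ∈ f q := by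
  induction l generalizing s0 with
  | nil => simp
  | cons q rest ih =>
    simp only [List.foldl_cons, ih, PySem.Set.mem_update, List.mem_cons]
    constructor
    · rintro (( h | h) | ⟨r, hr, hx⟩)
      · exact Or.inl h
      · exact Or.inr ⟨q, Or.inl rfl, h⟩
      · exact Or.inr ⟨r, Or.inr hr, hx⟩
    · rintro (h | ⟨r, (rfl | hr), hx⟩)
      · exact Or.inl (Or.inl h)
      · exact Or.inl (Or.inr hx)
      · exact Or.inr ⟨r, hr, hx⟩

theorem pvNodupFoldlUpdate {α β : Type} [BEq α] [LawfulBEq α] (l : List β) (f : β → List α)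
    (s0 : PySem.Set α) (h : s0.Nodup) :
    (l.foldl (fun s q => PySem.Set.update s (f q)) s0).Nodup := by
  induction l generalizing s0 with
  | nil => exact h
  | cons q rest ih => exact ih _ (PySem.Set.nodup_update _ _ h)

-- nested loop over per-vertex lists = one loop over the concatenation
theorem pvFoldlFlat {α β γ : Type} (l : List α) (h : α → List β) (g : γ → β → γ) (c0 : γ) :
    l.foldl (fun c v => (h v).foldl g c) c0 = (l.flatMap h).foldl g c0 := by
  induction l generalizing c0 with
  | nil => rfl
  | cons v rest ih => simp only [List.foldl_cons, List.flatMap_cons, List.foldl_append, ih]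

-- a loop body guarded by `other ≠ f` = the loop over the filtered list
theorem pvFoldlIte {γ : Type} (l : List Int) (f0 : Int) (g : γ → Int → γ) (c0 : γ) :
    l.foldl (fun c x => if x = f0 then c else g c x) c0 =
    (l.filter (fun x => !(x == f0))).foldl g c0 := by
  rw [List.foldl_filter]
  induction l generalizing c0 with
  | nil => rfl
  | cons x rest ih =>
    simp only [List.foldl_cons, ih]
    by_cases hx : x = f0 <;> simp [hx]

theorem pvSumCount (vs : List Int) (FBf : Int → List Int) (hnd : ∀ v, (FBf v).Nodup) (x : Int) :
    (vs.flatMap FBf).count x = vs.countP (fun v => decide (x ∈ FBf v)) := by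
  induction vs with
  | nil => simp
  | cons v rest ih =>
    rw [List.flatMap_cons, List.count_append, List.countP_cons, ih]
    by_cases hv : x ∈ FBf v
    · rw [List.count_eq_one_of_mem (hnd v) hv]; simp [hv, Nat.add_comm]
    · rw [List.count_eq_zero.mpr hv]; simp [hv]

-- the per-facet computation: A's pairwise intersections = B's counting pass
theorem pvPerFacet (FBf : Int → List Int) (hnd : ∀ v, (FBf v).Nodup) (f : Int) (vs : List Int) :
    PySem.List.sorted
      ((pvCombo2 (vs.map (fun v => PySem.Set.diff (FBf v) [f]))).foldl
        (fun s q => PySem.Set.update s (PySem.Set.inter q.1 q.2)) []) (fun x => x) false =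
    PySem.List.sorted
      (((vs.foldl (fun c v => (FBf v).foldl (fun c other =>
          if other = f then c else c.insert other (c.getD other 0 + 1)) c)
          PySem.Dict.empty : PySem.Dict Int Int).items.filter (fun q => 2 ≤ q.2)).map (·.1))
      (fun x => x) false := by
  -- B's counts dict is a Counter of the filtered concatenation of the per-vertex facet lists
  have hB : (vs.foldl (fun c v => (FBf v).foldl (fun c other =>
        if other = f then c else c.insert other (c.getD other 0 + 1)) c)
        PySem.Dict.empty : PySem.Dict Int Int) =
      PySem.Dict.counter ((vs.flatMap FBf).filter (fun x => !(x == f))) := by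
    rw [pvFoldlFlat, pvFoldlIte]
    exact PySem.Dict.foldl_insert_getD_add_one_eq_counter _
  rw [hB, PySem.Dict.items_counter]
  set ys := (vs.flatMap FBf).filter (fun x => !(x == f)) with hys
  have hKB : ((((PySem.Set.ofList ys).map (fun k => (k, (ys.count k : Int)))).filter
        (fun q => 2 ≤ q.2)).map (·.1)) =
      (PySem.Set.ofList ys).filter (fun k => decide (2 ≤ (ys.count k : Int))) := by
    rw [List.filter_map, List.map_map]
    simp [Function.comp_def]
  rw [hKB]
  apply PySem.List.sorted_eq_sorted_of_perm _ _ _ (fun a b h => h)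
  apply (List.perm_ext_iff_of_nodup
    (pvNodupFoldlUpdate _ _ _ List.nodup_nil)
    ((PySem.Set.nodup_ofList ys).filter _)).mpr
  intro x
  rw [pvMemFoldlUpdate, List.mem_filter, PySem.Set.mem_ofList]
  have hA := pvCombo2_iff (vs.map (fun v => PySem.Set.diff (FBf v) [f])) (fun s => decide (x ∈ s))
  rw [List.countP_map] at hA
  simp only [decide_eq_true_eq, Function.comp_def] at hA
  simp only [List.not_mem_nil, false_or, PySem.Set.mem_inter, decide_eq_true_eq]
  rw [hA]
  by_cases hx : x = f
  · subst hx
    have h1 : vs.countP (fun v => decide (x ∈ PySem.Set.diff (FBf v) [x])) = 0 :=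
      List.countP_eq_zero.mpr (by
        intro v _
        simp [PySem.Set.mem_diff])
    have h2 : x ∉ ys := by
      intro hmem
      have := (List.mem_filter.mp hmem).2
      simp at this
    rw [h1]
    exact iff_of_false (by omega) (fun hc => h2 hc.1)
  · have hpred : vs.countP (fun v => decide (x ∈ PySem.Set.diff (FBf v) [f])) =
        vs.countP (fun v => decide (x ∈ FBf v)) :=
      List.countP_congr (by
        intro v _
        simp [PySem.Set.mem_diff, hx])
    have hcnt : ys.count x = vs.countP (fun v => decide (x ∈ FBf v)) := by
      rw [hys, List.count_filter (by simp [hx]), pvSumCount _ _ hnd]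
    have hmem : x ∈ ys ↔ 0 < ys.count x := List.count_pos_iff.symm
    have hcast : (2 ≤ (↑(ys.count x) : Int)) ↔ 2 ≤ ys.count x := by exact_mod_cast Iff.rfl
    rw [hpred, hmem, hcast, hcnt]
    omega

-- ===== VERDICT (by name: the statement is the Claim_ definition above) =====
theorem create_facet_connectivity_py_spec : Claim_equal_create_facet_connectivity_py := by
  intro fva _
  unfold Spec_create_facet_connectivity_py
  unfold create_facet_connectivity_py create_facet_connectivity_py_alt
  simp only [pvDictA, pvDictB]
  rw [PySem.List.foldl_append_singleton_eq_map, PySem.List.foldl_append_singleton_eq_map]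
  simp only [List.nil_append]
  apply List.map_congr_left
  intro p _
  exact pvPerFacet (pvFB fva) (pvFB_nodup fva) p.1 p.2
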